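-- pv_equiv track=rewrite | github.com/shubhammukati/Leetcode75 | Hash Map Set/problem2.py | uniqueNumber
-- ===== SOURCE A (Python) =====
-- def uniqueNumber(arr):
--     hset = {}
--     for i in range(len(arr)):
--         hset[arr[i]] = hset.get(arr[i], 0)+1
--     checker = set()
--     for key, value in hset.items():
--         if value in checker:
--             return False
--         else :
--             checker.add(value)
--     return True
-- ===== SOURCE B (Python) =====
-- def uniqueNumber(arr):
--     s = sorted(arr)
--     runs = []
--     run = 0
--     prev = None
--     for x in s:
--         if run > 0 and x == prev:
--             run += 1
--         else:
--             if run > 0: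
--                 runs.append(run)
--             run = 1
--         prev = x
--     if run > 0:
--         runs.append(run)
--     r2 = sorted(runs)
--     for a, b in zip(r2, r2[1:]):
--         if a == b:
--             return False
--     return True
-- ===== Notes on version B (the rewrite author's own statement) =====
-- stated objective: alternative
-- what changed: Replaces A's hash-based counting (dict) plus incremental seen-set duplicate check by a sort-based algorithm: sort the array, collect run lengths in one scan, sort the run lengths and check that no two adjacent run lengths are equal.
import Mathlib
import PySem

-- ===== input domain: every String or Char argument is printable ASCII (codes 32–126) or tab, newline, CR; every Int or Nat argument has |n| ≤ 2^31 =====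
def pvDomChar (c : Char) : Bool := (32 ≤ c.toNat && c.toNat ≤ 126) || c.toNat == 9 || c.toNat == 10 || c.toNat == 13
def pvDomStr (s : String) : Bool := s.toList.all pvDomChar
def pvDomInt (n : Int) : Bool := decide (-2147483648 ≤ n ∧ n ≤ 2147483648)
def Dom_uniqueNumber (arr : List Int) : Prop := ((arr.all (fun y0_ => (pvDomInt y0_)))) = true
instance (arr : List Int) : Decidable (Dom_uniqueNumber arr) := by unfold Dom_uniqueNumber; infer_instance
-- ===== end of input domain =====

-- B replaces A's hash-based counting (dict) and incremental seen-set duplicate check by a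
-- sort-based algorithm: sort, collect run lengths in one scan, sort the run lengths and
-- check adjacent pairs; a genuinely different algorithm of similar cost (no speed claim).

-- ===== PORT A =====
-- the 'for key, value in hset.items(): if value in checker: return False; else: checker.add(value)' loop
def uniqueNumberCheck : List (Int × Int) → PySem.Set Int → Bool
  | [], _ => true
  | (_, value) :: rest, checker =>
    if checker.contains value then false
    else uniqueNumberCheck rest (checker.add value)

def uniqueNumber (arr : List Int) : Bool :=
  let hset := (PySem.List.pyRange 0 (PySem.List.len arr)).foldl
    (fun d i => d.insert (PySem.List.pyGetD arr i 0) (d.getD (PySem.List.pyGetD arr i 0) 0 + 1))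
    (PySem.Dict.empty : PySem.Dict Int Int)
  uniqueNumberCheck hset.items PySem.Set.empty

-- ===== PORT B =====
-- 'if run > 0: runs.append(run)' (used in the loop's else-branch and after the loop)
def bFlush (st : List Int × Int × Option Int) : List Int :=
  if st.2.1 > 0 then st.1 ++ [st.2.1] else st.1

-- one iteration of B's 'for x in s' grouping loop; state = (runs, run, prev)
def bStep (st : List Int × Int × Option Int) (x : Int) : List Int × Int × Option Int :=
  if st.2.1 > 0 && (some x == st.2.2) then (st.1, st.2.1 + 1, some x)
  else (bFlush st, 1, some x)

-- the 'for a, b in zip(r2, r2[1:]): if a == b: return False' loop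
def uniqueNumberAdj : List (Int × Int) → Bool
  | [] => true
  | (a, b) :: t => if a == b then false else uniqueNumberAdj t

def uniqueNumber_alt (arr : List Int) : Bool :=
  let s := PySem.List.sorted arr (fun x => x) false
  let runs := bFlush (s.foldl bStep ([], 0, none))
  let r2 := PySem.List.sorted runs (fun x => x) false
  uniqueNumberAdj (r2.zip (r2.drop 1))    -- r2[1:] = drop 1 (exact for this literal slice)

-- ===== PRECONDITION & SPEC =====
def Spec_uniqueNumber (arr : List Int) (out : Bool) : Prop := out = uniqueNumber_alt arr
instance (arr : List Int) (out : Bool) : Decidable (Spec_uniqueNumber arr out) := by unfold Spec_uniqueNumber; infer_instance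

-- ===== CLAIM (what is proved, stated in full; the proofs are below) =====
def Claim_equal_uniqueNumber : Prop := ∀ (arr : List Int), Dom_uniqueNumber arr → Spec_uniqueNumber arr (uniqueNumber arr)

-- ===== LEMMAS AND PROOFS =====

-- run-length recursion (proof-only characterisation of B's grouping loop)
def bRuns : List Int → Int → Int → List Int
  | [], _, r => [r]
  | x :: xs, p, r => if x = p then bRuns xs p (r + 1) else r :: bRuns xs x 1

def bR : List Int → List Int
  | [] => []
  | x :: xs => bRuns xs x 1

-- the common value both programs decide Nodup of: counts of the distinct elements
def countsOf (arr : List Int) : List Int :=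
  (PySem.Set.ofList arr).map (fun k => (arr.count k : Int))

-- ---- A side ----

lemma check_true_iff (items : List (Int × Int)) (s : PySem.Set Int) :
    uniqueNumberCheck items s = true ↔
      ((items.map Prod.snd).Nodup ∧ ∀ v ∈ items.map Prod.snd, v ∉ s) := by
  induction items generalizing s with
  | nil => simp [uniqueNumberCheck]
  | cons kv rest ih =>
    obtain ⟨k, v⟩ := kv
    simp only [uniqueNumberCheck, List.map_cons, List.nodup_cons, List.mem_cons]
    split
    · rename_i hc
      rw [PySem.Set.contains, List.contains_iff_mem] at hc
      simp only [Bool.false_eq_true, false_iff]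
      rintro ⟨-, hall⟩
      exact hall v (Or.inl rfl) hc
    · rename_i hc
      rw [PySem.Set.contains, List.contains_iff_mem] at hc
      rw [ih (s.add v)]
      constructor
      · rintro ⟨hn, hall⟩
        have hvin : ∀ y ∈ rest.map Prod.snd, y ∉ s ∧ y ≠ v := by
          intro y hy
          have := hall y hy
          rw [PySem.Set.mem_add] at this
          exact ⟨fun h => this (Or.inl h), fun h => this (Or.inr h)⟩
        refine ⟨⟨fun h => (hvin v h).2 rfl, hn⟩, ?_⟩
        rintro y (rfl | hy)
        · exact hc
        · exact (hvin y hy).1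
      · rintro ⟨⟨hvn, hn⟩, hall⟩
        refine ⟨hn, fun y hy => ?_⟩
        rw [PySem.Set.mem_add]
        rintro (h | rfl)
        · exact hall y (Or.inr hy) h
        · exact hvn hy

lemma a_true_iff (arr : List Int) : uniqueNumber arr = true ↔ (countsOf arr).Nodup := by
  unfold uniqueNumber
  rw [PySem.List.foldl_pyRange_pyGetD arr 0
      (fun d x => d.insert x (d.getD x 0 + 1)) (PySem.Dict.empty : PySem.Dict Int Int) (le_refl 0)]
  simp only [Int.toNat_zero, List.drop_zero]
  rw [PySem.Dict.foldl_insert_getD_add_one_eq_counter arr, check_true_iff]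
  rw [PySem.Dict.items_counter]
  simp only [List.map_map]
  constructor
  · intro h
    have := h.1
    simpa [countsOf, Function.comp] using this
  · intro h
    constructor
    · simpa [countsOf, Function.comp] using h
    · intro v _ hv
      simp [PySem.Set.empty] at hv

-- ---- B side: the fold computes bR ----

lemma foldl_bStep_bridge (xs : List Int) (runs : List Int) (r : Int) (p : Int) (hr : 0 < r) :
    bFlush (xs.foldl bStep (runs, r, some p)) = runs ++ bRuns xs p r := by
  induction xs generalizing runs r p with
  | nil => simp [bFlush, bRuns, hr]
  | cons x xs ih =>
    by_cases hxp : x = p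
    · subst hxp
      have hstep : bStep (runs, r, some x) x = (runs, r + 1, some x) := by
        simp [bStep, hr]
      simp only [List.foldl_cons, hstep, bRuns]
      exact ih runs (r + 1) x (by omega)
    · have hstep : bStep (runs, r, some p) x = (runs ++ [r], 1, some x) := by
        simp [bStep, bFlush, hr, hxp]
      simp only [List.foldl_cons, hstep, bRuns, if_neg hxp]
      rw [ih (runs ++ [r]) 1 x (by omega), List.append_assoc]
      rfl

lemma runs_eq_bR (s : List Int) : bFlush (s.foldl bStep ([], 0, none)) = bR s := by
  cases s with
  | nil => simp [bFlush, bR]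
  | cons x xs =>
    have hstep : bStep ([], 0, none) x = ([], 1, some x) := by simp [bStep, bFlush]
    simp only [List.foldl_cons, hstep, bR]
    exact foldl_bStep_bridge xs [] 1 x (by omega)

-- ---- B side: bR of a sorted list is the list of counts of its distinct values ----

lemma bRuns_run (t : List Int) (xs : List Int) (p : Int) (r : Int) (h : ∀ y ∈ t, y = p) :
    bRuns (t ++ xs) p r = bRuns xs p (r + t.length) := by
  induction t generalizing r with
  | nil => simp
  | cons y t ih =>
    have hy : y = p := h y (by simp)
    subst hy
    simp only [List.cons_append, bRuns]
    rw [ih (r + 1) (fun z hz => h z (by simp [hz]))]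
    simp [List.length_cons]
    ring_nf

lemma bRuns_new (u : List Int) (p : Int) (r : Int) (h : ∀ y, u.head? = some y → y ≠ p) :
    bRuns u p r = r :: bR u := by
  cases u with
  | nil => simp [bRuns, bR]
  | cons y u' =>
    have hy : y ≠ p := h y rfl
    simp [bRuns, bR, hy]

lemma not_mem_of_sorted_head_ne (u : List Int) (x : Int) (hs : u.Pairwise (· ≤ ·))
    (hle : ∀ y ∈ u, x ≤ y) (hh : ∀ y, u.head? = some y → y ≠ x) : x ∉ u := by
  cases u with
  | nil => simp
  | cons y u' =>
    have hy : y ≠ x := hh y rfl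
    intro hx
    rcases List.mem_cons.mp hx with rfl | hx'
    · exact hy rfl
    · have h1 : y ≤ x := (List.pairwise_cons.mp hs).1 x hx'
      have h2 : x ≤ y := hle y (by simp)
      exact hy (le_antisymm h1 h2)

lemma head_dropWhile_false (p : Int → Bool) (l : List Int) (y : Int)
    (h : (l.dropWhile p).head? = some y) : p y = false := by
  induction l with
  | nil => simp [List.dropWhile] at h
  | cons a l ih =>
    by_cases hpa : p a = true
    · rw [List.dropWhile_cons_of_pos hpa] at h
      exact ih h
    · rw [List.dropWhile_cons_of_neg hpa] at h
      simp at h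
      subst h
      simpa using hpa

lemma foldl_add_mem_id (t : List Int) (s : List Int) (h : ∀ y ∈ t, y ∈ s) :
    t.foldl PySem.Set.add s = s := by
  induction t with
  | nil => rfl
  | cons y t ih =>
    have hy : PySem.Set.add s y = s := by
      simp [PySem.Set.add, PySem.Set.contains, h y (by simp)]
    simp only [List.foldl_cons, hy]
    exact ih (fun z hz => h z (by simp [hz]))

lemma foldl_add_prefix (u : List Int) (a : List Int) (b : List Int) (h : ∀ y ∈ u, y ∉ a) :
    u.foldl PySem.Set.add (a ++ b) = a ++ u.foldl PySem.Set.add b := by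
  induction u generalizing b with
  | nil => rfl
  | cons y u ih =>
    have hya : y ∉ a := h y (by simp)
    have hcontains : (a ++ b).contains y = b.contains y := by
      simp [hya]
    by_cases hyb : y ∈ b
    · have h1 : PySem.Set.add (a ++ b) y = a ++ b := by
        simp [PySem.Set.add, PySem.Set.contains, hyb]
      have h2 : PySem.Set.add b y = b := by
        simp [PySem.Set.add, PySem.Set.contains, hyb]
      simp only [List.foldl_cons, h1, h2]
      exact ih b (fun z hz => h z (by simp [hz]))
    · have h1 : PySem.Set.add (a ++ b) y = a ++ (b ++ [y]) := by
        simp [PySem.Set.add, PySem.Set.contains, hyb, hya]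
      have h2 : PySem.Set.add b y = b ++ [y] := by
        simp [PySem.Set.add, PySem.Set.contains, hyb]
      simp only [List.foldl_cons, h1, h2]
      exact ih (b ++ [y]) (fun z hz => h z (by simp [hz]))

lemma bR_sorted (n : Nat) : ∀ (s : List Int), s.length ≤ n → s.Pairwise (· ≤ ·) →
    bR s = (PySem.Set.ofList s).map (fun k => (s.count k : Int)) := by
  induction n with
  | zero =>
    intro s hlen _
    have : s = [] := List.eq_nil_of_length_eq_zero (Nat.le_zero.mp hlen)
    subst this
    simp [bR, PySem.Set.ofList]
  | succ n ih =>
    intro s hlen hsort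
    cases s with
    | nil => simp [bR, PySem.Set.ofList]
    | cons x xs =>
      set t := xs.takeWhile (fun y => y == x) with ht
      set u := xs.dropWhile (fun y => y == x) with hu
      have htu : t ++ u = xs := List.takeWhile_append_dropWhile
      have htx : ∀ y ∈ t, y = x := by
        intro y hy
        rw [ht] at hy
        exact eq_of_beq (List.mem_takeWhile_imp (p := fun y => y == x) hy)
      have hhead : ∀ y, u.head? = some y → y ≠ x := by
        intro y hy
        have := head_dropWhile_false (fun y => y == x) xs y (hu ▸ hy)
        simpa using this
      have hxs_pw : xs.Pairwise (· ≤ ·) := (List.pairwise_cons.mp hsort).2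
      have hxle : ∀ y ∈ xs, x ≤ y := (List.pairwise_cons.mp hsort).1
      have hu_sub : u.Sublist xs := List.dropWhile_sublist _
      have hu_pw : u.Pairwise (· ≤ ·) := List.Pairwise.sublist hu_sub hxs_pw
      have hu_le : ∀ y ∈ u, x ≤ y := fun y hy => hxle y (hu_sub.mem hy)
      have hxu : x ∉ u := not_mem_of_sorted_head_ne u x hu_pw hu_le hhead
      -- left side
      have hbr : bR (x :: xs) = (1 + (t.length : Int)) :: bR u := by
        show bRuns xs x 1 = _
        rw [← htu, bRuns_run t u x 1 htx, bRuns_new u x _ hhead]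
      -- ofList (x :: xs) = x :: ofList u
      have hofl : PySem.Set.ofList (x :: xs) = x :: PySem.Set.ofList u := by
        rw [PySem.Set.ofList_eq_foldl, PySem.Set.ofList_eq_foldl]
        simp only [List.foldl_cons]
        have hadd0 : PySem.Set.add ([] : List Int) x = [x] := by
          simp [PySem.Set.add, PySem.Set.contains]
        rw [hadd0, ← htu, List.foldl_append]
        have hft : t.foldl PySem.Set.add [x] = [x] := by
          apply foldl_add_mem_id
          intro y hy; simp [htx y hy]
        rw [hft]
        have : ([x] : List Int) = [x] ++ [] := by simp
        rw [this, foldl_add_prefix u [x] [] (by intro y hy; simp; rintro rfl; exact hxu hy)]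
        simp
      -- counts
      have hcx : ((x :: xs).count x : Int) = 1 + (t.length : Int) := by
        rw [List.count_cons_self, ← htu, List.count_append]
        have h1 : t.count x = t.length := List.count_eq_length.mpr (fun b hb => (htx b hb).symm)
        have h2 : u.count x = 0 := List.count_eq_zero.mpr hxu
        rw [h1, h2]
        push_cast
        ring
      have hcu : ∀ k ∈ PySem.Set.ofList u, ((x :: xs).count k : Int) = (u.count k : Int) := by
        intro k hk
        have hku : k ∈ u := (PySem.Set.mem_ofList u k).mp hk
        have hkx : k ≠ x := by rintro rfl; exact hxu hku
        rw [← htu]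
        have : (x :: (t ++ u)).count k = (x :: t).count k + u.count k := by
          rw [← List.cons_append, List.count_append]
        rw [this]
        have h0 : (x :: t).count k = 0 := by
          apply List.count_eq_zero.mpr
          intro hmem
          rcases List.mem_cons.mp hmem with rfl | hmem'
          · exact hkx rfl
          · exact hkx (htx k hmem')
        rw [h0]; simp
      -- IH on u
      have hulen : u.length ≤ n := by
        have h1 : u.length ≤ xs.length := List.length_dropWhile_le _ _
        have h2 : xs.length ≤ n := by simpa using Nat.lt_succ_iff.mp (Nat.lt_of_lt_of_le (by simp) hlen)
        omega
      have hru : bR u = (PySem.Set.ofList u).map (fun k => (u.count k : Int)) := ih u hulen hu_pw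
      rw [hbr, hofl, List.map_cons, hcx, hru]
      congr 1
      exact (List.map_congr_left hcu).symm

-- ---- B side: the adjacent-pair scan of a sorted list decides Nodup ----

lemma adj_true_iff_nodup (l : List Int) (h : l.Pairwise (· ≤ ·)) :
    uniqueNumberAdj (l.zip (l.drop 1)) = true ↔ l.Nodup := by
  induction l with
  | nil => simp [uniqueNumberAdj]
  | cons a rest ih =>
    cases rest with
    | nil => simp [uniqueNumberAdj]
    | cons b t =>
      have hpr : (b :: t).Pairwise (· ≤ ·) := (List.pairwise_cons.mp h).2
      have hab : a ≤ b := (List.pairwise_cons.mp h).1 b (by simp)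
      simp only [List.drop_succ_cons, List.drop_zero, List.zip_cons_cons, uniqueNumberAdj]
      by_cases he : a = b
      · subst he
        simp only [beq_self_eq_true]
        constructor
        · intro hf; exact absurd hf (by simp)
        · intro hn; exact absurd (List.nodup_cons.mp hn).1 (by simp)
      · rw [if_neg (by simp [he])]
        have := ih hpr
        simp only [List.drop_succ_cons, List.drop_zero] at this
        rw [this]
        constructor
        · intro hn
          refine List.nodup_cons.mpr ⟨?_, hn⟩
          intro hmem
          rcases List.mem_cons.mp hmem with rfl | hmem'
          · exact he rfl
          · have h1 : b ≤ a := (List.pairwise_cons.mp hpr).1 a hmem'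
            exact he (le_antisymm hab h1)
        · intro hn; exact (List.nodup_cons.mp hn).2

lemma b_true_iff (arr : List Int) : uniqueNumber_alt arr = true ↔ (countsOf arr).Nodup := by
  unfold uniqueNumber_alt
  simp only []
  set s := PySem.List.sorted arr (fun x => x) false with hs
  have hs_pw : s.Pairwise (· ≤ ·) := by
    have := PySem.List.sorted_pairwise arr (fun x => x)
    simpa [hs] using this
  have hs_perm : s.Perm arr := PySem.List.sorted_perm arr (fun x => x) false
  rw [runs_eq_bR, bR_sorted s.length s (le_refl _) hs_pw]
  set runs := (PySem.Set.ofList s).map (fun k => (s.count k : Int)) with hruns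
  set r2 := PySem.List.sorted runs (fun x => x) false with hr2
  have hr2_pw : r2.Pairwise (· ≤ ·) := by
    have := PySem.List.sorted_pairwise runs (fun x => x)
    simpa [hr2] using this
  rw [adj_true_iff_nodup r2 hr2_pw]
  have hr2_perm : r2.Perm runs := PySem.List.sorted_perm runs (fun x => x) false
  rw [hr2_perm.nodup_iff]
  have hcount : ∀ k ∈ PySem.Set.ofList s, (s.count k : Int) = (arr.count k : Int) := by
    intro k _
    rw [hs_perm.count_eq k]
  have hperm_ofl : (PySem.Set.ofList s).Perm (PySem.Set.ofList arr) := by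
    apply (List.perm_ext_iff_of_nodup (PySem.Set.nodup_ofList s) (PySem.Set.nodup_ofList arr)).mpr
    intro x
    rw [PySem.Set.mem_ofList, PySem.Set.mem_ofList, hs_perm.mem_iff]
  have hperm : runs.Perm (countsOf arr) := by
    rw [hruns, List.map_congr_left hcount]
    exact hperm_ofl.map _
  exact hperm.nodup_iff

-- ===== VERDICT (by name: the statement is the Claim_ definition above) =====
theorem uniqueNumber_spec : Claim_equal_uniqueNumber := by
  intro arr _
  unfold Spec_uniqueNumber
  rw [Bool.eq_iff_iff, a_true_iff, b_true_iff]
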